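-- pv_equiv track=rewrite | github.com/model103/LeetCode | 字节3.py | min_operations_to_good_array
-- ===== SOURCE A (Python) =====
-- def min_operations_to_good_array(n, arr):
--     freq = {}
--     for num in arr:
--         if num in freq:
--             freq[num] += 1
--         else:
--             freq[num] = 1
--
--     distinct_nums = len(freq)
--     max_freq = max(freq.values())
--     min_operations = min(n - max_freq, distinct_nums - 1)
--
--     return min_operations
-- ===== SOURCE B (Python) =====
-- def min_operations_to_good_array(n, arr):
--     # Sort, then one run-length pass: track distinct runs, current run length, max run length.
--     distinct = 0
--     max_freq = 0
--     run = 0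
--     prev = 0
--     for x in sorted(arr):
--         if distinct and x == prev:
--             run += 1
--         else:
--             distinct += 1
--             run = 1
--             prev = x
--         if run > max_freq:
--             max_freq = run
--     return min(n - max_freq, distinct - 1)
-- ===== Notes on version B (the rewrite author's own statement) =====
-- stated objective: alternative
-- what changed: Replaces the hash-map frequency dictionary with a sort followed by a single run-length scan that tracks distinct-run count and maximum run length in scalars.
import Mathlib
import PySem

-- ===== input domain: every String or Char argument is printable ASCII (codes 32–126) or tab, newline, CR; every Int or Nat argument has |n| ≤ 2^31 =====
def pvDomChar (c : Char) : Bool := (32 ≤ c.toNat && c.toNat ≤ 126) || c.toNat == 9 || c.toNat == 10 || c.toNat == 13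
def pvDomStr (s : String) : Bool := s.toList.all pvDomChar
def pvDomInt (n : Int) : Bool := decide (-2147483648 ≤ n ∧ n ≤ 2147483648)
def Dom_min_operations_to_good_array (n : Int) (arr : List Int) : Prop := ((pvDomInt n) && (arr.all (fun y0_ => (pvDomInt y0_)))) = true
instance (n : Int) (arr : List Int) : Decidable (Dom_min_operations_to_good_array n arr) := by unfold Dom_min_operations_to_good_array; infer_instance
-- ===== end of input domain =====

-- B replaces A's hash-map frequency dictionary by a sort followed by one run-length scan
-- (scalars for distinct-run count / current run / maximum run); an alternative algorithm, not claimed faster.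


-- ===== PORT A =====
def min_operations_to_good_array (n : Int) (arr : List Int) : Int :=
  let freq := arr.foldl
    (fun d num => if d.contains num then d.insert num (d.getD num 0 + 1) else d.insert num 1)
    PySem.Dict.empty
  let distinct_nums : Int := freq.size
  -- max(freq.values()): raises ValueError iff arr = [] (excluded by Pre_); getD 0 is never taken there
  let max_freq : Int := (PySem.List.max? freq.values (fun v => v)).getD 0
  min (n - max_freq) (distinct_nums - 1)

-- ===== PORT B =====
-- one step of Source B's loop body on the state (distinct, max_freq, run, prev)
def altStep (st : Int × Int × Int × Int) (x : Int) : Int × Int × Int × Int :=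
  let s1 := if st.1 ≠ 0 ∧ x = st.2.2.2 then (st.1, st.2.2.1 + 1, st.2.2.2)
            else (st.1 + 1, (1 : Int), x)
  (s1.1, if s1.2.1 > st.2.1 then s1.2.1 else st.2.1, s1.2.1, s1.2.2)

def min_operations_to_good_array_alt (n : Int) (arr : List Int) : Int :=
  let st := (PySem.List.sorted arr (fun x => x) false).foldl altStep (0, 0, 0, 0)
  min (n - st.2.1) (st.1 - 1)

-- ===== PRECONDITION & SPEC =====
-- Pre_ excludes exactly arr = [], where A's max(freq.values()) raises ValueError.
def Pre_min_operations_to_good_array (_n : Int) (arr : List Int) : Prop := arr ≠ []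
instance (n : Int) (arr : List Int) : Decidable (Pre_min_operations_to_good_array n arr) := by unfold Pre_min_operations_to_good_array; infer_instance
def pvWitness_min_operations_to_good_array : Int × List Int := (3, [1, 2, 2])

def Spec_min_operations_to_good_array (n : Int) (arr : List Int) (out : Int) : Prop := out = min_operations_to_good_array_alt n arr
instance (n : Int) (arr : List Int) (out : Int) : Decidable (Spec_min_operations_to_good_array n arr out) := by unfold Spec_min_operations_to_good_array; infer_instance

-- ===== CLAIM (what is proved, stated in full; the proofs are below) =====
def Claim_equal_min_operations_to_good_array : Prop := ∀ (n : Int) (arr : List Int), Dom_min_operations_to_good_array n arr → Pre_min_operations_to_good_array n arr → Spec_min_operations_to_good_array n arr (min_operations_to_good_array n arr)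

-- ===== LEMMAS AND PROOFS =====

theorem a_freq_eq_counter (arr : List Int) :
    arr.foldl
      (fun d num => if d.contains num then d.insert num (d.getD num 0 + 1) else d.insert num 1)
      PySem.Dict.empty = PySem.Dict.counter arr := by
  rw [← PySem.Dict.foldl_insert_getD_add_one_eq_counter]
  congr 1
  funext d x
  by_cases h : d.contains x = true
  · simp [h]
  · rw [if_neg (by simp [h]), PySem.Dict.getD_of_not_contains d 0 (by simpa using h)]
    norm_num

theorem ofList_append_singleton {l : List Int} {x : Int} :
    PySem.Set.ofList (l ++ [x]) = (PySem.Set.ofList l).add x := by simp [pysem]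

theorem alt_fold_inv (s : List Int) (hs : s.Pairwise (· ≤ ·)) (hne : s ≠ []) :
    ∃ d m r p, s.foldl altStep (0, 0, 0, 0) = (d, m, r, p) ∧
      p ∈ s ∧ (∀ y ∈ s, y ≤ p) ∧
      r = (List.count p s : Int) ∧
      d = ((PySem.Set.ofList s).length : Int) ∧
      (∀ k ∈ s, (List.count k s : Int) ≤ m) ∧ (∃ k ∈ s, (List.count k s : Int) = m) := by
  induction s using List.reverseRecOn with
  | nil => exact absurd rfl hne
  | append_singleton s x ih =>
    rw [List.pairwise_append] at hs
    obtain ⟨hs1, -, hle⟩ := hs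
    simp only [List.mem_singleton] at hle
    by_cases h0 : s = []
    · subst h0
      refine ⟨1, 1, 1, x, ?_, by simp, by simp, by simp, by simp [pysem], by simp, ⟨x, by simp⟩⟩
      simp [altStep]
    · obtain ⟨d, m, r, p, heq, hpmem, hpmax, hr, hd, hub, k0, hk0, hkm⟩ := ih hs1 h0
      have hxle : p ≤ x := hle p hpmem x rfl
      have hd1 : d ≠ 0 := by
        have : p ∈ PySem.Set.ofList s := (PySem.Set.mem_ofList s p).mpr hpmem
        have : (PySem.Set.ofList s).length ≠ 0 := by
          intro h; rw [List.length_eq_zero_iff] at h; simp [h] at this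
        omega
      have hm1 : 1 ≤ m := by
        have := hub p hpmem
        have : 1 ≤ List.count p s := List.one_le_count_iff.mpr hpmem
        omega
      rw [List.foldl_append, heq]
      by_cases hxp : x = p
      · -- run continues
        subst hxp
        refine ⟨d, if r + 1 > m then r + 1 else m, r + 1, x, ?_, by simp, ?_, ?_, ?_, ?_, ?_⟩
        · simp [altStep, hd1]
        · intro y hy
          rcases List.mem_append.mp hy with hy | hy
          · exact hpmax y hy
          · simp at hy; omega
        · simp [List.count_append, hr]
        · rw [ofList_append_singleton, PySem.Set.add_of_mem ((PySem.Set.mem_ofList s x).mpr hpmem), hd]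
        · intro k hk
          rcases List.mem_append.mp hk with hk | hk
          · by_cases hkx : k = x
            · subst hkx; simp [List.count_append, hr]; split <;> omega
            · have := hub k hk
              simp [List.count_append, List.count_singleton]
              split <;> omega
          · simp at hk; subst hk
            simp [List.count_append, hr]; split <;> omega
        · by_cases hc : r + 1 > m
          · exact ⟨x, by simp, by simp [List.count_append, hr]; omega⟩
          · refine ⟨k0, List.mem_append_left _ hk0, ?_⟩
            have hk0x : k0 ≠ x := by
              intro h; subst h; rw [← hr] at hkm; omega
            simp [List.count_append, Ne.symm hk0x, hkm, hc]
      · -- new run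
        have hxnot : x ∉ s := by
          intro hxs
          exact hxp (le_antisymm (hpmax x hxs) hxle)
        refine ⟨d + 1, m, 1, x, ?_, by simp, ?_, ?_, ?_, ?_, ?_⟩
        · simp [altStep, hxp]; omega
        · intro y hy
          rcases List.mem_append.mp hy with hy | hy
          · exact le_trans (hpmax y hy) hxle
          · simp at hy; omega
        · simp [List.count_append, List.count_eq_zero_of_not_mem hxnot]
        · rw [ofList_append_singleton,
            PySem.Set.add_of_not_mem (fun h => hxnot ((PySem.Set.mem_ofList s x).mp h))]
          simp [hd]
        · intro k hk
          rcases List.mem_append.mp hk with hk | hk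
          · have hkx : k ≠ x := fun h => hxnot (h ▸ hk)
            have := hub k hk
            simpa [List.count_append, List.count_singleton, hkx, Ne.symm hkx] using this
          · simp at hk; subst hk
            simp [List.count_append, List.count_eq_zero_of_not_mem hxnot]; omega
        · have hk0x : k0 ≠ x := fun h => hxnot (h ▸ hk0)
          exact ⟨k0, List.mem_append_left _ hk0,
            by simp [List.count_append, Ne.symm hk0x, hkm]⟩

theorem min_ops_ab_eq (n : Int) (arr : List Int) (hpre : arr ≠ []) :
    min_operations_to_good_array n arr = min_operations_to_good_array_alt n arr := by
  simp only [min_operations_to_good_array, min_operations_to_good_array_alt,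
    a_freq_eq_counter]
  set s := PySem.List.sorted arr (fun x => x) false with hsdef
  have hperm : s.Perm arr := PySem.List.sorted_perm arr (fun x => x) false
  have hs : s.Pairwise (· ≤ ·) := PySem.List.sorted_pairwise arr (fun x => x)
  have hnes : s ≠ [] := by
    intro h; exact hpre ((PySem.List.sorted_eq_nil_iff arr (fun x => x) false).mp h)
  obtain ⟨d, m, r, p, heq, hpmem, hpmax, hr, hd, hub, k0, hk0, hkm⟩ := alt_fold_inv s hs hnes
  rw [heq]
  have hvals : (PySem.Dict.counter arr).values
      = (PySem.Set.ofList arr).map (fun k => (List.count k arr : Int)) := by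
    simp [PySem.Dict.values, PySem.Dict.items_counter]
  have hsize : ((PySem.Dict.counter arr).size : Int) = ((PySem.Set.ofList arr).length : Int) := by
    simp [PySem.Dict.size, PySem.Dict.items_counter]
  have hvalsne : (PySem.Dict.counter arr).values ≠ [] := by
    rw [hvals]
    obtain ⟨a, ha⟩ := List.exists_mem_of_ne_nil arr hpre
    have : a ∈ PySem.Set.ofList arr := (PySem.Set.mem_ofList arr a).mpr ha
    intro h
    simp [List.map_eq_nil_iff] at h
    simp [h] at this
  obtain ⟨mA, hmA⟩ : ∃ mA, PySem.List.max? (PySem.Dict.counter arr).values (fun v => v) = some mA := by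
    cases hcase : PySem.List.max? (PySem.Dict.counter arr).values (fun v => v) with
    | none => exact absurd ((PySem.List.max?_eq_none_iff _ _).mp hcase) hvalsne
    | some v => exact ⟨v, rfl⟩
  have hmAm : mA = m := by
    have hmem := PySem.List.max?_mem hmA
    rw [hvals] at hmem
    obtain ⟨k, hkmem, hkeq⟩ := List.mem_map.mp hmem
    have hks : k ∈ s := hperm.mem_iff.mpr ((PySem.Set.mem_ofList arr k).mp hkmem)
    have le1 : mA ≤ m := by
      rw [← hkeq, ← hperm.count_eq k]
      exact hub k hks
    have le2 : m ≤ mA := by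
      have hk0arr : k0 ∈ arr := hperm.mem_iff.mp hk0
      have : (List.count k0 arr : Int) ∈ (PySem.Dict.counter arr).values := by
        rw [hvals]
        exact List.mem_map.mpr ⟨k0, (PySem.Set.mem_ofList arr k0).mpr hk0arr, rfl⟩
      have := PySem.List.max?_isMax hmA _ this
      simpa [← hkm, hperm.count_eq k0] using this
    omega
  have hlen : ((PySem.Set.ofList arr).length : Int) = ((PySem.Set.ofList s).length : Int) := by
    have := ((List.perm_ext_iff_of_nodup (PySem.Set.nodup_ofList arr) (PySem.Set.nodup_ofList s)).mpr
      (fun x => by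
        rw [PySem.Set.mem_ofList, PySem.Set.mem_ofList]
        exact hperm.mem_iff.symm)).length_eq
    exact_mod_cast this
  rw [hmA, hsize, hlen, hd, hmAm]
  simp

-- ===== VERDICT (by name: the statement is the Claim_ definition above) =====
theorem min_operations_to_good_array_spec : Claim_equal_min_operations_to_good_array := by
  intro n arr _ hpre
  exact min_ops_ab_eq n arr hpre
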